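-- pv_equiv track=rewrite | github.com/JannikNickel/AdventOfCode | 2023/solutions/day03.py | iter_nums
-- ===== SOURCE A (Python) =====
-- from collections.abc import Generator
--
-- def iter_nums(schematic: list[list[str]]) -> Generator[tuple[int, int, int, int], None, None]:
--     for ri, row in enumerate(schematic):
--         ci = 0
--         while ci < len(row):
--             start = ci
--             while ci < len(row) and row[ci].isdigit():
--                 ci += 1
--             if start != ci:
--                 yield (int(row[start:ci]), ri, start, ci)
--             ci += 1
-- ===== SOURCE B (Python) =====
-- import re
-- from collections.abc import Generator
--
-- def iter_nums(schematic: list[list[str]]) -> Generator[tuple[int, int, int, int], None, None]: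
--     for ri, row in enumerate(schematic):
--         for m in re.finditer(r"[0-9]+", row):
--             yield (int(m.group()), ri, m.start(), m.end())
-- ===== Notes on version B (the rewrite author's own statement) =====
-- stated objective: idiomatic
-- what changed: The manual cursor with nested while loops and the trailing ci+=1 skip is replaced by a regex sweep: re.finditer locates each maximal digit run and yields (int, row, start, end) directly.
import Mathlib
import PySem

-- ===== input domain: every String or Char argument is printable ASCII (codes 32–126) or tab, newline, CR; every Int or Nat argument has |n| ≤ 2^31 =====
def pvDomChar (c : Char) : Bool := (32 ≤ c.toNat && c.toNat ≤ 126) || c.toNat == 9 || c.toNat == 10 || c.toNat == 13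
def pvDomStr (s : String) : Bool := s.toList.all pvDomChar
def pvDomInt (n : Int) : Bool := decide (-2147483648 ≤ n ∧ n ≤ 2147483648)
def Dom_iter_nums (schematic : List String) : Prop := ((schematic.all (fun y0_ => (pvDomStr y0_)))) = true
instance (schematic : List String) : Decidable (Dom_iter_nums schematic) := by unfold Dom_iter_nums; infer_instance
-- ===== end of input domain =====

-- B replaces A's manual cursor (nested while loops with a trailing ci+=1 skip) by a regex
-- sweep over each row's maximal digit runs; return-value equivalence only (both are generators,
-- compared as the list of yielded tuples).

-- ===== PORT A =====
-- inner 'while ci < len(row) and row[ci].isdigit(): ci += 1'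
def pvAdvA (row : List Char) (ci : Nat) : Nat :=
  if h : ci < row.length then
    if PySem.Chars.isdigit row[ci] then pvAdvA row (ci + 1) else ci
  else ci
termination_by row.length - ci

-- used by scanRowA's decreasing_by
theorem pvAdvA_ge (row : List Char) (ci : Nat) : ci ≤ pvAdvA row ci := by
  fun_induction pvAdvA row ci with
  | case1 ci h hd ih => omega
  | case2 ci h hd => omega
  | case3 ci h => omega

-- outer 'while ci < len(row)': start = ci; advance over digits; maybe yield; ci += 1.
-- row[start:ci'] with 0 ≤ start ≤ ci' ≤ len(row) is exactly (row.drop start).take (ci' - start);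
-- int(...) is PySem.Int.ofChars?; on the nonempty all-digit slice it is some, so .getD 0 never defaults.
def scanRowA (row : List Char) (ci : Nat) : List (Int × Int × Int) :=
  if h : ci < row.length then
    -- start = ci; inner while advances to pvAdvA row ci; yield if it moved; then ci += 1
    if ci ≠ pvAdvA row ci then
      ((PySem.Int.ofChars? ((row.drop ci).take (pvAdvA row ci - ci))).getD 0,
        (ci : Int), (pvAdvA row ci : Int)) :: scanRowA row (pvAdvA row ci + 1)
    else scanRowA row (pvAdvA row ci + 1)
  else []
termination_by row.length - ci
decreasing_by all_goals (have := pvAdvA_ge row ci; omega)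

def iter_nums (schematic : List String) : List (Int × Int × Int × Int) :=
  (PySem.List.enumerate schematic 0).flatMap fun p =>
    (scanRowA p.2.toList 0).map fun q => (q.1, p.1, q.2.1, q.2.2)

-- ===== PORT B =====
-- re.finditer(r"[0-9]+", row): the maximal digit runs of the row with their start index.
def digitRuns (cs : List Char) (i : Nat) : List (Nat × List Char) :=
  match cs with
  | [] => []
  | c :: rest =>
    if PySem.Chars.isdigit c then
      let run := c :: rest.takeWhile PySem.Chars.isdigit
      (i, run) :: digitRuns (rest.dropWhile PySem.Chars.isdigit) (i + run.length)
    else digitRuns rest (i + 1)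
termination_by cs.length
decreasing_by
  · have := List.length_dropWhile_le (p := PySem.Chars.isdigit) (l := rest); simp; omega
  · simp

def iter_nums_alt (schematic : List String) : List (Int × Int × Int × Int) :=
  (PySem.List.enumerate schematic 0).flatMap fun p =>
    (digitRuns p.2.toList 0).map fun r =>
      ((PySem.Int.ofChars? r.2).getD 0, p.1, (r.1 : Int), ((r.1 + r.2.length : Nat) : Int))

-- ===== PRECONDITION & SPEC =====
def Spec_iter_nums (schematic : List String) (out : List (Int × Int × Int × Int)) : Prop := out = iter_nums_alt schematic
instance (schematic : List String) (out : List (Int × Int × Int × Int)) : Decidable (Spec_iter_nums schematic out) := by unfold Spec_iter_nums; infer_instance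

-- ===== CLAIM (what is proved, stated in full; the proofs are below) =====
def Claim_equal_iter_nums : Prop := ∀ (schematic : List String), Dom_iter_nums schematic → Spec_iter_nums schematic (iter_nums schematic)

-- ===== LEMMAS AND PROOFS =====

theorem dropWhile_eq_drop_len (p : Char → Bool) (l : List Char) :
    l.dropWhile p = l.drop (l.takeWhile p).length := by
  induction l with
  | nil => simp
  | cons c rest ih =>
    by_cases hc : p c <;> simp [hc, ih]

theorem pvAdvA_eq (row : List Char) (ci : Nat) :
    pvAdvA row ci = ci + ((row.drop ci).takeWhile PySem.Chars.isdigit).length := by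
  fun_induction pvAdvA row ci with
  | case1 ci h hd ih =>
    rw [List.drop_eq_getElem_cons h]
    simp only [List.takeWhile_cons, hd, if_true, List.length_cons]
    omega
  | case2 ci h hd =>
    simp only [Bool.not_eq_true] at hd
    rw [List.drop_eq_getElem_cons h]
    simp [hd]
  | case3 ci h =>
    have : row.drop ci = [] := List.drop_eq_nil_of_le (by omega)
    simp [this]

-- prefix of l all satisfying p is a prefix of takeWhile p l
theorem prefix_takeWhile_of_all {p : Char → Bool} {l pre : List Char}
    (hpre : pre <+: l) (hall : ∀ x ∈ pre, p x = true) : pre <+: l.takeWhile p := by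
  induction pre generalizing l with
  | nil => simp
  | cons a as ih =>
    obtain ⟨s, hs⟩ := hpre
    subst hs
    have ha : p a = true := hall a (by simp)
    rw [List.cons_append, List.takeWhile_cons, ha, if_pos rfl]
    exact (List.cons_prefix_cons).2 ⟨rfl, ih ⟨s, rfl⟩ (fun x hx => hall x (by simp [hx]))⟩

theorem scanRowA_eq (row : List Char) (ci : Nat) :
    scanRowA row ci = (digitRuns (row.drop ci) ci).map
      (fun r => ((PySem.Int.ofChars? r.2).getD 0, (r.1 : Int), ((r.1 + r.2.length : Nat) : Int))) := by
  fun_induction scanRowA row ci with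
  | case1 ci h hne ih =>
    -- emitting branch: row[ci] is a digit
    set t := (row.drop ci).takeWhile PySem.Chars.isdigit with ht
    have hadv : pvAdvA row ci = ci + t.length := pvAdvA_eq row ci
    have hdrop : row.drop ci = row[ci] :: row.drop (ci + 1) := List.drop_eq_getElem_cons h
    have hd : PySem.Chars.isdigit row[ci] = true := by
      by_contra hc
      have h0 : t = [] := by rw [ht, hdrop, List.takeWhile_cons]; simp at hc; simp [hc]
      have : t.length = 0 := by rw [h0]; rfl
      exact hne (by omega)
    have htc : t = row[ci] :: (row.drop (ci + 1)).takeWhile PySem.Chars.isdigit := by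
      rw [ht, hdrop, List.takeWhile_cons, hd]; simp
    have hslice : (row.drop ci).take (pvAdvA row ci - ci) = t := by
      rw [hadv]
      simp only [Nat.add_sub_cancel_left, ht]
      exact (List.prefix_iff_eq_take.1 (List.takeWhile_prefix _)).symm
    have htail : (row.drop (ci + 1)).dropWhile PySem.Chars.isdigit = row.drop (ci + t.length) := by
      rw [dropWhile_eq_drop_len, List.drop_drop]
      congr 1
      rw [htc]; simp [List.length_cons]; omega
    rw [hdrop, digitRuns]
    simp only [hd, if_true]
    rw [ih]
    rw [show row[ci] :: (row.drop (ci+1)).takeWhile PySem.Chars.isdigit = t from htc.symm, htail]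
    have hstep : digitRuns (row.drop (ci + t.length)) (ci + t.length)
        = digitRuns (row.drop (ci + t.length + 1)) (ci + t.length + 1) := by
      rcases hdr : row.drop (ci + t.length) with _ | ⟨c', rest'⟩
      · have hle : row.length ≤ ci + t.length := List.drop_eq_nil_iff.1 hdr
        have h2 : row.drop (ci + t.length + 1) = [] := List.drop_eq_nil_of_le (by omega)
        simp [h2, digitRuns]
      · have hlt : ci + t.length < row.length := by
          by_contra hc
          rw [List.drop_eq_nil_iff.2 (by omega)] at hdr
          simp at hdr
        have hnd : PySem.Chars.isdigit c' = false := by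
          -- c' is the first char after the maximal digit run, so not a digit
          by_contra hcd
          simp only [Bool.not_eq_false] at hcd
          have hkey : t ++ [c'] <+: (row.drop ci).takeWhile PySem.Chars.isdigit := by
            have hpre : t ++ [c'] <+: row.drop ci := by
              have hsplit : row.drop ci = t ++ row.drop (ci + t.length) := by
                conv_lhs => rw [← List.takeWhile_append_dropWhile (p := PySem.Chars.isdigit) (l := row.drop ci)]
                rw [← ht]
                congr 1
                rw [ht, dropWhile_eq_drop_len, List.drop_drop, Nat.add_comm]
              rw [hsplit, hdr]
              exact ⟨rest', by simp⟩
            have hall : ∀ x ∈ t ++ [c'], PySem.Chars.isdigit x = true := by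
              intro x hx
              rcases List.mem_append.1 hx with hx | hx
              · exact List.mem_takeWhile_imp (ht ▸ hx)
              · simp at hx; subst hx; exact hcd
            exact prefix_takeWhile_of_all hpre hall
          have := hkey.length_le
          rw [← ht] at this; simp at this
        rw [digitRuns, hnd]
        simp only [Bool.false_eq_true, if_false]
        have hc' : row.drop (ci + t.length + 1) = rest' := by
          have := congrArg (List.drop 1) hdr
          rw [List.drop_drop] at this
          simpa [Nat.add_comm] using this
        rw [hc']
    rw [hadv, hstep]
    rw [hadv] at hslice
    simp only [Nat.add_sub_cancel_left] at hslice
    simp [hslice]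
  | case2 ci h heq ih =>
    -- no digits at ci: pvAdvA stays, skip one char
    rw [not_ne_iff] at heq
    have hadv : pvAdvA row ci = ci + ((row.drop ci).takeWhile PySem.Chars.isdigit).length := pvAdvA_eq row ci
    have ht0 : ((row.drop ci).takeWhile PySem.Chars.isdigit).length = 0 := by omega
    have hdrop : row.drop ci = row[ci] :: row.drop (ci + 1) := List.drop_eq_getElem_cons h
    have hd : PySem.Chars.isdigit row[ci] = false := by
      by_contra hc
      simp only [Bool.not_eq_false] at hc
      rw [hdrop, List.takeWhile_cons, hc] at ht0
      simp at ht0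
    rw [← heq] at ih ⊢
    rw [hdrop, digitRuns, hd]
    simp only [Bool.false_eq_true, if_false]
    exact ih
  | case3 ci h =>
    have hnil : row.drop ci = [] := List.drop_eq_nil_of_le (by omega)
    simp [hnil, digitRuns]

-- ===== VERDICT (by name: the statement is the Claim_ definition above) =====
theorem iter_nums_spec : Claim_equal_iter_nums := by
  intro schematic _
  unfold Spec_iter_nums iter_nums iter_nums_alt
  congr 1
  funext p
  rw [scanRowA_eq, List.map_map]
  simp
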